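-- pv_equiv track=rewrite | github.com/natashalukmanto/dsa | epi-python/snake_string.py | snake_string
-- ===== SOURCE A (Python) =====
-- def snake_string(s: str) -> str:
--     # return s[1::4] + s[::2] + s[3::4]
--
--     result = []
--
--     for i in range(1, len(s), 4):
--         result.append(s[i])
--     for j in range(0, len(s), 2):
--         result.append(s[j])
--     for k in range(3, len(s), 4):
--         result.append(s[k])
--
--     return "".join(result)
-- ===== SOURCE B (Python) =====
-- def snake_string(s: str) -> str:
--     top, middle, bottom = [], [], []
--     for i in range(len(s)):
--         c = s[i]
--         r = i % 4
--         if r == 1: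
--             top.append(c)
--         elif r == 0 or r == 2:
--             middle.append(c)
--         else:
--             bottom.append(c)
--     return "".join(top + middle + bottom)
-- ===== Notes on version B (the rewrite author's own statement) =====
-- stated objective: alternative
-- what changed: Replaces A's three separate strided scans (steps 4, 2, 4) with a single pass over all indices that classifies each character by i % 4 into top/middle/bottom buckets and concatenates them.
import Mathlib
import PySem

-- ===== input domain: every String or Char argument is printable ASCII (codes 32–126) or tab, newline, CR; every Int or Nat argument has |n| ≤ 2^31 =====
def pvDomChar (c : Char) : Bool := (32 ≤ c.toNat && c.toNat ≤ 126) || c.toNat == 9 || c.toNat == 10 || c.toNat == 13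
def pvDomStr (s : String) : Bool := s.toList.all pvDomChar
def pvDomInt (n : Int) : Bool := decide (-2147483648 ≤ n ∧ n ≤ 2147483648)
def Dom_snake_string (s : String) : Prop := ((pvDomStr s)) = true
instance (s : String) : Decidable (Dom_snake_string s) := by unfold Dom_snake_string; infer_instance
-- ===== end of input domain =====

-- B replaces A's three strided scans with one pass over all indices, bucketing by i % 4 (alternative decomposition, same cost).

-- ===== PORT A =====
-- A's three strided index loops; every index the ranges produce is in range, so pyGetD with a
-- dummy default is exact for Python's s[i] here.
def snake_string (s : String) : String :=
  let cs := s.toList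
  let n : Int := (cs.length : Int)
  let result : List Char :=
    (PySem.List.pyRange 1 n 4).foldl (fun acc i => acc ++ [PySem.List.pyGetD cs i ' ']) []
  let result :=
    (PySem.List.pyRange 0 n 2).foldl (fun acc j => acc ++ [PySem.List.pyGetD cs j ' ']) result
  let result :=
    (PySem.List.pyRange 3 n 4).foldl (fun acc k => acc ++ [PySem.List.pyGetD cs k ' ']) result
  String.ofList result

-- ===== PORT B =====
-- single pass: classify index i by i % 4 into (top, middle, bottom) buckets
def snake_string_alt (s : String) : String :=
  let cs := s.toList
  let n : Int := (cs.length : Int)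
  let buckets :=
    (PySem.List.pyRange 0 n 1).foldl
      (fun (acc : List Char × List Char × List Char) i =>
        let c := PySem.List.pyGetD cs i ' '
        let r := PySem.Int.mod i 4
        if r = 1 then (acc.1 ++ [c], acc.2.1, acc.2.2)
        else if r = 0 ∨ r = 2 then (acc.1, acc.2.1 ++ [c], acc.2.2)
        else (acc.1, acc.2.1, acc.2.2 ++ [c]))
      ([], [], [])
  String.ofList (buckets.1 ++ buckets.2.1 ++ buckets.2.2)

-- ===== PRECONDITION & SPEC =====
def Spec_snake_string (s : String) (out : String) : Prop := out = snake_string_alt s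
instance (s : String) (out : String) : Decidable (Spec_snake_string s out) := by unfold Spec_snake_string; infer_instance

-- ===== CLAIM (what is proved, stated in full; the proofs are below) =====
def Claim_equal_snake_string : Prop := ∀ (s : String), Dom_snake_string s → Spec_snake_string s (snake_string s)

-- ===== LEMMAS AND PROOFS =====

def pvQ1 (i : Int) : Bool := decide (PySem.Int.mod i 4 = 1)
def pvQ2 (i : Int) : Bool := !pvQ1 i && decide (PySem.Int.mod i 4 = 0 ∨ PySem.Int.mod i 4 = 2)
def pvQ3 (i : Int) : Bool := !pvQ1 i && !decide (PySem.Int.mod i 4 = 0 ∨ PySem.Int.mod i 4 = 2)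

def pvF (cs : List Char) (i : Int) : Char := PySem.List.pyGetD cs i ' '

def pvStep (cs : List Char) (acc : List Char × List Char × List Char) (i : Int) :
    List Char × List Char × List Char :=
  if pvQ1 i then (acc.1 ++ [pvF cs i], acc.2.1, acc.2.2)
  else if pvQ2 i then (acc.1, acc.2.1 ++ [pvF cs i], acc.2.2)
  else (acc.1, acc.2.1, acc.2.2 ++ [pvF cs i])

theorem pv_step_fun_eq (cs : List Char) :
    (fun (acc : List Char × List Char × List Char) i =>
        let c := PySem.List.pyGetD cs i ' '
        let r := PySem.Int.mod i 4
        if r = 1 then (acc.1 ++ [c], acc.2.1, acc.2.2)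
        else if r = 0 ∨ r = 2 then (acc.1, acc.2.1 ++ [c], acc.2.2)
        else (acc.1, acc.2.1, acc.2.2 ++ [c]))
    = pvStep cs := by
  funext acc i
  show (if PySem.Int.mod i 4 = 1 then (acc.1 ++ [PySem.List.pyGetD cs i ' '], acc.2.1, acc.2.2)
        else if PySem.Int.mod i 4 = 0 ∨ PySem.Int.mod i 4 = 2 then
          (acc.1, acc.2.1 ++ [PySem.List.pyGetD cs i ' '], acc.2.2)
        else (acc.1, acc.2.1, acc.2.2 ++ [PySem.List.pyGetD cs i ' '])) = pvStep cs acc i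
  unfold pvStep pvF
  by_cases h1 : PySem.Int.mod i 4 = 1
  · have q1 : pvQ1 i = true := by unfold pvQ1; exact decide_eq_true h1
    rw [if_pos h1, if_pos q1]
  · have q1 : pvQ1 i = false := by unfold pvQ1; exact decide_eq_false h1
    by_cases h2 : PySem.Int.mod i 4 = 0 ∨ PySem.Int.mod i 4 = 2
    · have q2 : pvQ2 i = true := by
        unfold pvQ2 pvQ1
        rw [decide_eq_false h1, decide_eq_true h2]; decide
      rw [if_neg h1, if_pos h2, if_neg (by rw [q1]; exact Bool.false_ne_true),
        if_pos q2]
    · have q2 : pvQ2 i = false := by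
        unfold pvQ2 pvQ1
        rw [decide_eq_false h1, decide_eq_false h2]; decide
      rw [if_neg h1, if_neg h2, if_neg (by rw [q1]; exact Bool.false_ne_true),
        if_neg (by rw [q2]; exact Bool.false_ne_true)]

theorem pv_bucket_fold (cs : List Char) (l : List Int) (t m b : List Char) :
    l.foldl (pvStep cs) (t, m, b)
    = (t ++ (l.filter pvQ1).map (pvF cs),
       m ++ (l.filter pvQ2).map (pvF cs),
       b ++ (l.filter pvQ3).map (pvF cs)) := by
  induction l generalizing t m b with
  | nil => simp
  | cons x xs ih =>
    simp only [List.foldl_cons, List.filter_cons]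
    cases hq1 : pvQ1 x with
    | true =>
      have hq2 : pvQ2 x = false := by simp [pvQ2, hq1]
      have hq3 : pvQ3 x = false := by simp [pvQ3, hq1]
      simp [pvStep, hq1, hq2, hq3, ih, List.append_assoc]
    | false =>
      cases hq2 : pvQ2 x with
      | true =>
        have hd : decide (PySem.Int.mod x 4 = 0 ∨ PySem.Int.mod x 4 = 2) = true := by
          unfold pvQ2 at hq2
          rw [hq1] at hq2
          simpa only [Bool.not_false, Bool.true_and] using hq2
        have hq3 : pvQ3 x = false := by unfold pvQ3; rw [hq1, hd]; decide
        simp [pvStep, hq1, hq2, hq3, ih, List.append_assoc]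
      | false =>
        have hd : decide (PySem.Int.mod x 4 = 0 ∨ PySem.Int.mod x 4 = 2) = false := by
          unfold pvQ2 at hq2
          rw [hq1] at hq2
          simpa only [Bool.not_false, Bool.true_and] using hq2
        have hq3 : pvQ3 x = true := by unfold pvQ3; rw [hq1, hd]; decide
        simp [pvStep, hq1, hq2, hq3, ih, List.append_assoc]

theorem pv_pyRange_pos_nil (a b s : Int) (h : b ≤ a) (hs : (0:Int) < s) :
    PySem.List.pyRange a b s = [] := by
  rw [PySem.List.pyRange_of_pos a b hs, if_neg (by omega)]
  simp

theorem pv_pyRange4_succ (a b : Int) (h : a ≤ b + 1) :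
    PySem.List.pyRange a (b + 1) 4 =
      PySem.List.pyRange a b 4 ++ (if b % 4 = a % 4 then [b] else []) := by
  rw [PySem.List.pyRange_of_pos a (b+1) (by norm_num), PySem.List.pyRange_of_pos a b (by norm_num)]
  by_cases hd : b % 4 = a % 4
  · have h1 : (if a < b + 1 then ((b + 1 - a + 4 - 1) / 4).toNat else 0)
        = (if a < b then ((b - a + 4 - 1) / 4).toNat else 0) + 1 := by
      split_ifs <;> omega
    have h2 : a + 4 * (((if a < b then ((b - a + 4 - 1) / 4).toNat else 0) : Nat) : Int) = b := by
      split_ifs <;> omega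
    rw [h1, List.range_succ, List.map_append, if_pos hd]
    simp only [List.map_cons, List.map_nil, List.append_cancel_left_eq, List.cons.injEq, and_true]
    omega
  · have h1 : (if a < b + 1 then ((b + 1 - a + 4 - 1) / 4).toNat else 0)
        = (if a < b then ((b - a + 4 - 1) / 4).toNat else 0) := by
      split_ifs <;> omega
    rw [h1, if_neg hd, List.append_nil]

theorem pv_pyRange2_succ (a b : Int) (h : a ≤ b + 1) :
    PySem.List.pyRange a (b + 1) 2 =
      PySem.List.pyRange a b 2 ++ (if b % 2 = a % 2 then [b] else []) := by
  rw [PySem.List.pyRange_of_pos a (b+1) (by norm_num), PySem.List.pyRange_of_pos a b (by norm_num)]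
  by_cases hd : b % 2 = a % 2
  · have h1 : (if a < b + 1 then ((b + 1 - a + 2 - 1) / 2).toNat else 0)
        = (if a < b then ((b - a + 2 - 1) / 2).toNat else 0) + 1 := by
      split_ifs <;> omega
    have h2 : a + 2 * (((if a < b then ((b - a + 2 - 1) / 2).toNat else 0) : Nat) : Int) = b := by
      split_ifs <;> omega
    rw [h1, List.range_succ, List.map_append, if_pos hd]
    simp only [List.map_cons, List.map_nil, List.append_cancel_left_eq, List.cons.injEq, and_true]
    omega
  · have h1 : (if a < b + 1 then ((b + 1 - a + 2 - 1) / 2).toNat else 0)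
        = (if a < b then ((b - a + 2 - 1) / 2).toNat else 0) := by
      split_ifs <;> omega
    rw [h1, if_neg hd, List.append_nil]

theorem pv_mod4 (m : Nat) : PySem.Int.mod (m : Int) 4 = (m : Int) % 4 :=
  PySem.Int.mod_eq_emod_of_pos (by norm_num)

theorem pv_filter_q1 (m : Nat) :
    ((PySem.List.pyRange 0 (m : Int) 1).filter pvQ1) = PySem.List.pyRange 1 (m : Int) 4 := by
  induction m with
  | zero => simp [pv_pyRange_pos_nil 0 0 1 le_rfl, pv_pyRange_pos_nil 1 0 4 (by omega)]
  | succ k ih =>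
    have hc : ((k + 1 : Nat) : Int) = (k : Int) + 1 := by push_cast; ring
    have hm : PySem.Int.mod (k : Int) 4 = (k : Int) % 4 := pv_mod4 k
    rw [hc, PySem.List.pyRange_one_succ_right (by positivity), List.filter_append, ih,
      pv_pyRange4_succ 1 (k : Int) (by omega)]
    congr 1
    rw [List.filter_singleton]
    by_cases h : (k : Int) % 4 = 1
    · have hval : pvQ1 (k : Int) = true := by unfold pvQ1; rw [hm]; simp [h]
      simp [hval, h]
    · have hval : pvQ1 (k : Int) = false := by unfold pvQ1; rw [hm]; simp [h]
      simp [hval, h]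

theorem pv_filter_q2 (m : Nat) :
    ((PySem.List.pyRange 0 (m : Int) 1).filter pvQ2) = PySem.List.pyRange 0 (m : Int) 2 := by
  induction m with
  | zero => simp [pv_pyRange_pos_nil 0 0 1 le_rfl, pv_pyRange_pos_nil 0 0 2 le_rfl]
  | succ k ih =>
    have hc : ((k + 1 : Nat) : Int) = (k : Int) + 1 := by push_cast; ring
    have hm : PySem.Int.mod (k : Int) 4 = (k : Int) % 4 := pv_mod4 k
    have hk : 0 ≤ (k : Int) := by positivity
    rw [hc, PySem.List.pyRange_one_succ_right (by positivity), List.filter_append, ih,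
      pv_pyRange2_succ 0 (k : Int) (by omega)]
    congr 1
    rw [List.filter_singleton]
    by_cases h : (k : Int) % 2 = 0
    · have h4 : (k : Int) % 4 = 0 ∨ (k : Int) % 4 = 2 := by omega
      have hne : ¬ (k : Int) % 4 = 1 := by omega
      have hval : pvQ2 (k : Int) = true := by
        unfold pvQ2 pvQ1; rw [hm]
        rcases h4 with h4 | h4 <;> simp [h4]
      simp [hval, h]
    · have hval : pvQ2 (k : Int) = false := by
        unfold pvQ2 pvQ1; rw [hm]
        have h0 : ¬ (k : Int) % 4 = 0 := by omega
        have h2 : ¬ (k : Int) % 4 = 2 := by omega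
        simp [h0, h2]
      simp [hval, h]

theorem pv_filter_q3 (m : Nat) :
    ((PySem.List.pyRange 0 (m : Int) 1).filter pvQ3) = PySem.List.pyRange 3 (m : Int) 4 := by
  induction m with
  | zero => simp [pv_pyRange_pos_nil 0 0 1 le_rfl, pv_pyRange_pos_nil 3 0 4 (by omega)]
  | succ k ih =>
    rcases Nat.lt_or_ge k 2 with hk2 | hk2
    · interval_cases k <;> decide
    · have hc : ((k + 1 : Nat) : Int) = (k : Int) + 1 := by push_cast; ring
      have hm : PySem.Int.mod (k : Int) 4 = (k : Int) % 4 := pv_mod4 k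
      have hk2' : (2 : Int) ≤ (k : Int) := by exact_mod_cast hk2
      rw [hc, PySem.List.pyRange_one_succ_right (by positivity), List.filter_append, ih,
        pv_pyRange4_succ 3 (k : Int) (by omega)]
      congr 1
      rw [List.filter_singleton]
      by_cases h : (k : Int) % 4 = 3
      · have hval : pvQ3 (k : Int) = true := by unfold pvQ3 pvQ1; rw [hm]; simp [h]
        simp [hval, h]
      · have hval : pvQ3 (k : Int) = false := by
          unfold pvQ3 pvQ1; rw [hm]
          have hk : 0 ≤ (k : Int) := by positivity
          have h4 : (k : Int) % 4 = 0 ∨ (k : Int) % 4 = 1 ∨ (k : Int) % 4 = 2 := by omega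
          rcases h4 with h4 | h4 | h4 <;> simp [h4]
        simp [hval, h]

-- ===== VERDICT (by name: the statement is the Claim_ definition above) =====
theorem snake_string_spec : Claim_equal_snake_string := by
  intro s _
  unfold Spec_snake_string snake_string snake_string_alt
  simp only [PySem.List.foldl_append_singleton_eq_map, List.nil_append, pv_step_fun_eq,
    pv_bucket_fold, pv_filter_q1, pv_filter_q2, pv_filter_q3]
  rfl
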